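-- pv_equiv track=rewrite | github.com/radunegru/AoC | python/2024/07.py | rec1
-- ===== SOURCE A (Python) =====
-- def rec1(target:int, compute: int, terms: list[int], current: int) -> bool:
--     if current == len(terms):
--         if compute == target:
--             return True
--         else:
--             return False
--     intermediate = compute * terms[current]
--     if intermediate <= target:
--         if rec1(target, intermediate, terms, current + 1):
--             return True
--     intermediate = compute + terms[current]
--     if intermediate > target:
--         return False
--     else:
--         return rec1(target, intermediate, terms, current + 1)
-- ===== SOURCE B (Python) =====
-- def rec1(target: int, compute: int, terms: list[int], current: int) -> bool:
--     # Breadth-first level sets: frontier of all values reachable at each index,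
--     # pruning any child value exceeding target (same guard as the recursive search).
--     frontier = [compute]
--     for i in range(current, len(terms)):
--         t = terms[i]
--         frontier = [r for v in frontier for r in (v * t, v + t) if r <= target]
--     return target in frontier
-- ===== Notes on version B (the rewrite author's own statement) =====
-- stated objective: alternative
-- what changed: Replaces the depth-first recursion with early return by an iterative breadth-first level-set search: a frontier list of all values reachable at each index (children pruned by the same <= target guard) is folded over the indices, and membership of target in the final frontier gives the answer.
import Mathlib
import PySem

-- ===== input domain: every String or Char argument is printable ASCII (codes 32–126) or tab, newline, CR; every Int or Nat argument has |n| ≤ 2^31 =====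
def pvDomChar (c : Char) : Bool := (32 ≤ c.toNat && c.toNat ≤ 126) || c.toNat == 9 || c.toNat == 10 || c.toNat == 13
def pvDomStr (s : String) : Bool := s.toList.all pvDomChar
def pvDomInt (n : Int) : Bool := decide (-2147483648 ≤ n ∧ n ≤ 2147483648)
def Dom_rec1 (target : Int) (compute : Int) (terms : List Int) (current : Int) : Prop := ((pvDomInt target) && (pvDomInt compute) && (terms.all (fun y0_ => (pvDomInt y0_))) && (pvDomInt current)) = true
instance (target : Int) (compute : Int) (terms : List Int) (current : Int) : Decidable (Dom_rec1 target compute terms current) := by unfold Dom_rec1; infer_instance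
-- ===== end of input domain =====

-- B replaces the depth-first recursion by an iterative breadth-first frontier fold (alternative decomposition, same pruning guards).

-- ===== PORT A =====
-- fuel = remaining recursion depth; rec1 supplies (len - current).toNat + 1, which is exact on Pre_
def rec1Fuel : Nat → Int → Int → List Int → Int → Bool
  | 0, _, _, _, _ => false
  | f+1, target, compute, terms, current =>
    if current = (terms.length : Int) then
      decide (compute = target)
    else
      match PySem.List.pyGet? terms current with
      | none => false   -- IndexError in Python; excluded by Pre_
      | some t =>
        if (if compute * t ≤ target then rec1Fuel f target (compute * t) terms (current + 1) else false) then
          true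
        else if target < compute + t then
          false
        else
          rec1Fuel f target (compute + t) terms (current + 1)

def rec1 (target : Int) (compute : Int) (terms : List Int) (current : Int) : Bool :=
  rec1Fuel (((terms.length : Int) - current).toNat + 1) target compute terms current

-- ===== PORT B =====
-- one level of B's comprehension: all guarded children of the frontier
def rec1Step (target t : Int) (frontier : List Int) : List Int :=
  frontier.flatMap (fun v => [v * t, v + t].filter (fun r => decide (r ≤ target)))

def rec1_alt (target : Int) (compute : Int) (terms : List Int) (current : Int) : Bool :=
  let frontier := (PySem.List.pyRange current (terms.length : Int) 1).foldl
    (fun fr i =>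
      match PySem.List.pyGet? terms i with
      | none => []   -- IndexError in Python; excluded by Pre_
      | some t => rec1Step target t fr) [compute]
  frontier.contains target

-- ===== PRECONDITION & SPEC =====
-- Pre_: exactly the inputs where A's recursion never indexes out of range (Python IndexError otherwise)
def Pre_rec1 (target : Int) (compute : Int) (terms : List Int) (current : Int) : Prop :=
  -(terms.length : Int) ≤ current ∧ current ≤ (terms.length : Int)
instance (target : Int) (compute : Int) (terms : List Int) (current : Int) : Decidable (Pre_rec1 target compute terms current) := by unfold Pre_rec1; infer_instance

def pvWitness_rec1 : Int × Int × List Int × Int := (6, 1, [2, 3], 0)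

def Spec_rec1 (target : Int) (compute : Int) (terms : List Int) (current : Int) (out : Bool) : Prop := out = rec1_alt target compute terms current
instance (target : Int) (compute : Int) (terms : List Int) (current : Int) (out : Bool) : Decidable (Spec_rec1 target compute terms current out) := by unfold Spec_rec1; infer_instance

-- ===== CLAIM (what is proved, stated in full; the proofs are below) =====
def Claim_equal_rec1 : Prop := ∀ (target : Int) (compute : Int) (terms : List Int) (current : Int), Dom_rec1 target compute terms current → Pre_rec1 target compute terms current → Spec_rec1 target compute terms current (rec1 target compute terms current)

-- ===== LEMMAS AND PROOFS =====

-- per-value agreement of one unfolding of A with the guarded-children disjunction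
lemma rec1Fuel_succ_eq (f : Nat) (target v t : Int) (terms : List Int) (current : Int)
    (hne : current ≠ (terms.length : Int))
    (hget : PySem.List.pyGet? terms current = some t) :
    rec1Fuel (f+1) target v terms current
      = ((if v * t ≤ target then rec1Fuel f target (v * t) terms (current+1) else false)
         || (if v + t ≤ target then rec1Fuel f target (v + t) terms (current+1) else false)) := by
  simp only [rec1Fuel, if_neg hne, hget]
  split_ifs with h1 h2 h3 h4 h5 <;> simp_all <;> omega

-- main invariant: B's frontier fold from index `current` decides A's search for every frontier value
lemma key (target : Int) (terms : List Int) :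
    ∀ (n : Nat) (current : Int), (((terms.length : Int) - current).toNat = n) →
    -(terms.length : Int) ≤ current → current ≤ (terms.length : Int) →
    ∀ fr : List Int,
      ((PySem.List.pyRange current (terms.length : Int) 1).foldl
        (fun fr i =>
          match PySem.List.pyGet? terms i with
          | none => []
          | some t => rec1Step target t fr) fr).contains target
        = fr.any (fun v => rec1Fuel (n+1) target v terms current) := by
  intro n
  induction n with
  | zero =>
    intro current hn hlo hhi fr
    have hcur : current = (terms.length : Int) := by omega
    subst hcur
    rw [PySem.List.pyRange_one_eq_nil (by omega)]
    simp only [List.foldl_nil, rec1Fuel, List.contains_eq_any_beq]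
    congr 1; funext v; by_cases h : target = v
    · simp [h]
    · simp [h, Ne.symm h]
  | succ m ih =>
    intro current hn hlo hhi fr
    have hlt : current < (terms.length : Int) := by omega
    obtain ⟨t, hget⟩ : ∃ t, PySem.List.pyGet? terms current = some t := by
      cases h : PySem.List.pyGet? terms current with
      | none =>
        exfalso
        rw [PySem.List.pyGet?_eq_none_iff] at h
        exact h (by unfold PySem.Raise.InRange; omega)
      | some t => exact ⟨t, rfl⟩
    rw [PySem.List.pyRange_one_cons hlt]
    simp only [List.foldl_cons, hget]
    rw [ih (current + 1) (by omega) (by omega) (by omega)]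
    simp only [rec1Step, List.any_flatMap]
    congr 1
    funext v
    rw [rec1Fuel_succ_eq (m+1) target v t terms current (by omega) hget]
    simp only [List.filter]
    by_cases h1 : v * t ≤ target <;> by_cases h2 : v + t ≤ target <;> simp [h1, h2]

-- ===== VERDICT (by name: the statement is the Claim_ definition above) =====
theorem rec1_spec : Claim_equal_rec1 := by
  intro target compute terms current _ hpre
  unfold Spec_rec1 rec1 rec1_alt
  rw [key target terms (((terms.length : Int) - current).toNat) current rfl hpre.1 hpre.2 [compute]]
  simp
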